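-- pv_equiv track=rewrite | github.com/80asv/coursera | Semana 3/listas/el_novio_tacano.py | producto_mas_barato
-- ===== SOURCE A (Python) =====
-- def producto_mas_barato(catalogo: dict)->str:
--     if not catalogo:
--         return "No hay productos para escoger"
--     flipped = {}
--     for key, value in catalogo.items():
--         if value not in flipped:
--             flipped[value] = [key]
--         else:
--             flipped[value].append(key)
--     menor = min(flipped.keys())
--     cheap_prod = sorted(flipped[min(flipped.keys())])
--
--     return None if menor > 10000 else cheap_prod[0]
-- ===== SOURCE B (Python) =====
-- def producto_mas_barato(catalogo: dict) -> str:
--     if not catalogo: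
--         return "No hay productos para escoger"
--     items = list(catalogo.items())
--     best_name, best_price = items[0]
--     for key, value in items[1:]:
--         if value < best_price or (value == best_price and key < best_name):
--             best_name, best_price = key, value
--     return None if best_price > 10000 else best_name
-- ===== Notes on version B (the rewrite author's own statement) =====
-- stated objective: simpler
-- what changed: Replaced building an inverse price->names dict, taking min over its keys and sorting the cheapest group, by a single linear scan over the items that maintains a running (price, name) minimum with lexicographic tie-break.
import Mathlib
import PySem

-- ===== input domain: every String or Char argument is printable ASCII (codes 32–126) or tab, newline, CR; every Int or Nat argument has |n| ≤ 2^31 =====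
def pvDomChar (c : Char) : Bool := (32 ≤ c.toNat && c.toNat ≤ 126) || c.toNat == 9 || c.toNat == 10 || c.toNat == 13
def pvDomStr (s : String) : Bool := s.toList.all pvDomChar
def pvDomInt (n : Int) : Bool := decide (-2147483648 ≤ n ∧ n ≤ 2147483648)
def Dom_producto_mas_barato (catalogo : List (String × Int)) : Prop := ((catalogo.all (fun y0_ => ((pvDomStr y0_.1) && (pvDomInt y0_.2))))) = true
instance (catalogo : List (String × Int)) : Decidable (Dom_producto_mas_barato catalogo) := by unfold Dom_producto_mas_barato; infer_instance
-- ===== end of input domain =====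

-- B replaces A's inverse-dict + min + sort by a single running-minimum scan (simpler, same observable result).

-- ===== PORT A =====
def producto_mas_barato (catalogo : List (String × Int)) : Option String :=
  let cat := PySem.Dict.ofList catalogo
  if cat.items = [] then some "No hay productos para escoger"
  else
    let flipped : PySem.Dict Int (List String) :=
      cat.items.foldl (fun f kv =>
        if f.contains kv.2 = false then f.insert kv.2 [kv.1]
        else f.modify kv.2 [] (fun l => l ++ [kv.1])) PySem.Dict.empty
    match PySem.List.min? flipped.keys (fun x => x) with
    | none => none   -- unreachable: flipped is nonempty here (min over empty would raise)
    | some menor =>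
      let cheap_prod := PySem.List.sorted (flipped.getD menor []) (fun x => x) false
      if menor > 10000 then none else PySem.List.pyGet? cheap_prod 0

-- ===== PORT B =====
def producto_mas_barato_alt (catalogo : List (String × Int)) : Option String :=
  match (PySem.Dict.ofList catalogo).items with
  | [] => some "No hay productos para escoger"
  | kv0 :: rest =>
    let best := rest.foldl (fun b kv =>
      if kv.2 < b.2 || (kv.2 == b.2 && kv.1 < b.1) then kv else b) kv0
    if best.2 > 10000 then none else some best.1

-- ===== PRECONDITION & SPEC =====
def Spec_producto_mas_barato (catalogo : List (String × Int)) (out : Option String) : Prop := out = producto_mas_barato_alt catalogo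
instance (catalogo : List (String × Int)) (out : Option String) : Decidable (Spec_producto_mas_barato catalogo out) := by unfold Spec_producto_mas_barato; infer_instance

-- ===== CLAIM (what is proved, stated in full; the proofs are below) =====
def Claim_equal_producto_mas_barato : Prop := ∀ (catalogo : List (String × Int)), Dom_producto_mas_barato catalogo → Spec_producto_mas_barato catalogo (producto_mas_barato catalogo)

-- ===== LEMMAS AND PROOFS =====

-- "(price, name) lexicographic ≤" on items
def pvLe (a b : String × Int) : Prop := a.2 < b.2 ∨ (a.2 = b.2 ∧ a.1 ≤ b.1)

theorem pvLe_refl (a : String × Int) : pvLe a a := Or.inr ⟨rfl, le_refl _⟩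

theorem pvLe_trans {a b c : String × Int} (h1 : pvLe a b) (h2 : pvLe b c) : pvLe a c := by
  rcases h1 with h1 | ⟨h1, h1'⟩ <;> rcases h2 with h2 | ⟨h2, h2'⟩
  · exact Or.inl (lt_trans h1 h2)
  · exact Or.inl (h2 ▸ h1)
  · exact Or.inl (h1 ▸ h2)
  · exact Or.inr ⟨h1.trans h2, h1'.trans h2'⟩

theorem pvLe_antisymm {a b : String × Int} (h1 : pvLe a b) (h2 : pvLe b a) : a = b := by
  rcases h1 with h1 | ⟨h1, h1'⟩ <;> rcases h2 with h2 | ⟨h2, h2'⟩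
  · exact absurd h2 (not_lt.mpr (le_of_lt h1))
  · exact absurd h1 (not_lt.mpr (le_of_eq h2))
  · exact absurd h2 (not_lt.mpr (le_of_eq h1))
  · exact Prod.ext (le_antisymm h1' h2') h1

def pvStep (b kv : String × Int) : String × Int :=
  if kv.2 < b.2 || (kv.2 == b.2 && kv.1 < b.1) then kv else b

theorem pvStep_le_left (b kv : String × Int) : pvLe (pvStep b kv) b := by
  unfold pvStep
  split
  · rename_i h
    simp only [Bool.or_eq_true, decide_eq_true_eq, Bool.and_eq_true, beq_iff_eq] at h
    rcases h with h | ⟨h, h'⟩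
    · exact Or.inl h
    · exact Or.inr ⟨h, le_of_lt h'⟩
  · exact pvLe_refl b

theorem pvStep_le_right (b kv : String × Int) : pvLe (pvStep b kv) kv := by
  unfold pvStep
  split
  · exact pvLe_refl kv
  · rename_i h
    simp only [Bool.or_eq_true, decide_eq_true_eq, Bool.and_eq_true, beq_iff_eq, not_or,
      not_and] at h
    obtain ⟨h1, h2⟩ := h
    rcases lt_trichotomy b.2 kv.2 with hlt | heq | hgt
    · exact Or.inl hlt
    · exact Or.inr ⟨heq, not_lt.mp (fun hh => (h2 heq.symm) hh)⟩
    · exact absurd hgt (fun hh => h1 hh)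

theorem pvStep_mem (b kv : String × Int) : pvStep b kv = b ∨ pvStep b kv = kv := by
  unfold pvStep; split
  · exact Or.inr rfl
  · exact Or.inl rfl

-- The running-minimum fold returns an element of b :: xs that is pvLe-below all of them.
theorem pvFold_spec (xs : List (String × Int)) (b : String × Int) :
    (xs.foldl pvStep b = b ∨ xs.foldl pvStep b ∈ xs) ∧
      pvLe (xs.foldl pvStep b) b ∧ ∀ p ∈ xs, pvLe (xs.foldl pvStep b) p := by
  induction xs generalizing b with
  | nil => exact ⟨Or.inl rfl, pvLe_refl b, by simp⟩
  | cons y t ih =>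
    obtain ⟨hmem, hle, hall⟩ := ih (pvStep b y)
    refine ⟨?_, ?_, ?_⟩
    · rcases hmem with h | h
      · rcases pvStep_mem b y with h' | h'
        · exact Or.inl (by rw [List.foldl_cons, h, h'])
        · refine Or.inr ?_
          rw [List.foldl_cons, h, h']
          exact List.mem_cons_self
      · refine Or.inr ?_
        rw [List.foldl_cons]
        exact List.mem_cons_of_mem _ h
    · rw [List.foldl_cons]
      exact pvLe_trans hle (pvStep_le_left b y)
    · intro p hp
      rw [List.foldl_cons]
      rcases List.mem_cons.mp hp with rfl | hp
      · exact pvLe_trans hle (pvStep_le_right b p)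
      · exact hall p hp

-- A's inner grouping loop is the uniform modify/append loop.
theorem pvFlip_eq (xs : List (String × Int)) (d : PySem.Dict Int (List String)) :
    xs.foldl (fun f kv =>
        if f.contains kv.2 = false then f.insert kv.2 [kv.1]
        else f.modify kv.2 [] (fun l => l ++ [kv.1])) d
      = xs.foldl (fun f kv => f.modify kv.2 [] (fun l => l ++ [kv.1])) d := by
  induction xs generalizing d with
  | nil => rfl
  | cons y t ih =>
    rw [List.foldl_cons, List.foldl_cons]
    have hstep : (if d.contains y.2 = false then d.insert y.2 [y.1]
        else d.modify y.2 [] (fun l => l ++ [y.1])) = d.modify y.2 [] (fun l => l ++ [y.1]) := by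
      split
      · rename_i h
        unfold PySem.Dict.modify
        rw [PySem.Dict.getD_of_not_contains d [] h]
        rfl
      · rfl
    rw [hstep, ih]

theorem pvFlip_getD (xs : List (String × Int)) (v : Int) :
    (xs.foldl (fun f kv => f.modify kv.2 [] (fun l => l ++ [kv.1]))
        (PySem.Dict.empty : PySem.Dict Int (List String))).getD v []
      = (xs.filter (fun p => p.2 == v)).map (·.1) := by
  have h := PySem.Dict.getD_foldl_modify_append
    (l := xs.map (fun p => (p.2, p.1))) (d := (PySem.Dict.empty : PySem.Dict Int (List String)))
    (c := v)
  rw [List.foldl_map] at h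
  simp only [PySem.Dict.getD_empty, List.nil_append] at h
  rw [h, List.filter_map, List.map_map]
  rfl

theorem pvFlip_keys_mem (xs : List (String × Int)) (v : Int) :
    v ∈ (xs.foldl (fun f kv => f.modify kv.2 [] (fun l => l ++ [kv.1]))
        (PySem.Dict.empty : PySem.Dict Int (List String))).keys ↔ v ∈ xs.map (·.2) := by
  rw [PySem.Dict.keys_foldl_modify_key xs (fun p => p.2) []
    (fun _ kv => (fun l => l ++ [kv.1])) PySem.Dict.empty]
  rw [PySem.Dict.keys_empty, PySem.Set.update_nil_left, PySem.Set.mem_ofList]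

-- main: both ports agree on any catalogo
theorem pv_main (xs : List (String × Int)) :
    producto_mas_barato_alt xs = producto_mas_barato xs := by
  cases hxs : (PySem.Dict.ofList xs).items with
  | nil =>
    unfold producto_mas_barato producto_mas_barato_alt
    simp only [hxs]
    simp
  | cons kv0 rest =>
    -- B's pair
    obtain ⟨hBmem, hBle0, hBall⟩ := pvFold_spec rest kv0
    set bb := rest.foldl pvStep kv0 with hbb
    have hBmem' : bb ∈ kv0 :: rest := by
      rcases hBmem with h | h
      · exact h ▸ List.mem_cons_self
      · exact List.mem_cons_of_mem _ h
    have hBall' : ∀ p ∈ kv0 :: rest, pvLe bb p := by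
      intro p hp
      rcases List.mem_cons.mp hp with rfl | hp
      · exact hBle0
      · exact hBall p hp
    have hB : producto_mas_barato_alt xs = (if bb.2 > 10000 then none else some bb.1) := by
      unfold producto_mas_barato_alt
      simp only [hxs]
      rfl
    -- A's flipped dict
    set ys := kv0 :: rest with hys
    set flipped := ys.foldl (fun f kv => f.modify kv.2 [] (fun l => l ++ [kv.1]))
        (PySem.Dict.empty : PySem.Dict Int (List String)) with hflip
    have hkeysne : flipped.keys ≠ [] := by
      intro h
      have : bb.2 ∈ flipped.keys := (pvFlip_keys_mem ys bb.2).mpr (List.mem_map_of_mem hBmem')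
      rw [h] at this
      exact absurd this (List.not_mem_nil)
    obtain ⟨menor, hmin⟩ : ∃ m, PySem.List.min? flipped.keys (fun x => x) = some m := by
      cases h : PySem.List.min? flipped.keys (fun x => x) with
      | none => exact absurd ((PySem.List.min?_eq_none_iff _ _).mp h) hkeysne
      | some m => exact ⟨m, rfl⟩
    have hmmem : menor ∈ ys.map (·.2) :=
      (pvFlip_keys_mem ys menor).mp (PySem.List.min?_mem hmin)
    have hmmin : ∀ v ∈ ys.map (·.2), menor ≤ v := by
      intro v hv
      exact PySem.List.min?_isMin hmin v ((pvFlip_keys_mem ys v).mpr hv)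
    have hgroup : flipped.getD menor [] = (ys.filter (fun p => p.2 == menor)).map (·.1) :=
      pvFlip_getD ys menor
    have hgne : flipped.getD menor [] ≠ [] := by
      rw [hgroup]
      obtain ⟨p, hp, hp2⟩ := List.mem_map.mp hmmem
      intro h
      have hmem : p ∈ ys.filter (fun p => p.2 == menor) :=
        List.mem_filter.mpr ⟨hp, by simp [hp2]⟩
      rw [List.map_eq_nil_iff.mp h] at hmem
      exact absurd hmem (List.not_mem_nil)
    cases hsort : PySem.List.sorted (flipped.getD menor []) (fun x => x) false with
    | nil => exact absurd ((PySem.List.sorted_eq_nil_iff _ _ _).mp hsort) hgne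
    | cons h0 t =>
      have hA : producto_mas_barato xs = (if menor > 10000 then none else some h0) := by
        unfold producto_mas_barato
        simp only [hxs]
        rw [if_neg (List.cons_ne_nil kv0 rest)]
        rw [pvFlip_eq, ← hflip, hmin]
        simp only [hsort]
        by_cases hb : menor > 10000
        · rw [if_pos hb, if_pos hb]
        · rw [if_neg hb, if_neg hb]
          simp [PySem.List.pyGet?, PySem.List.pyIdx?]
      -- A's pair is (h0, menor); it equals bb by pvLe-antisymmetry
      have hh0mem : h0 ∈ flipped.getD menor [] := by
        have hm : h0 ∈ PySem.List.sorted (flipped.getD menor []) (fun x => x) false := by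
          rw [hsort]; exact List.mem_cons_self
        exact (PySem.List.mem_sorted _ _ _ _).mp hm
      have hh0pair : (h0, menor) ∈ ys := by
        rw [hgroup] at hh0mem
        obtain ⟨p, hp, hp1⟩ := List.mem_map.mp hh0mem
        have hp2 : p.2 = menor := by simpa using (List.mem_filter.mp hp).2
        have hpe : p = (h0, menor) := Prod.ext hp1 hp2
        exact hpe ▸ (List.mem_filter.mp hp).1
      have hh0min : ∀ p ∈ ys, pvLe (h0, menor) p := by
        intro p hp
        rcases lt_or_eq_of_le (hmmin p.2 (List.mem_map_of_mem hp)) with hlt | heq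
        · exact Or.inl hlt
        · refine Or.inr ⟨heq, ?_⟩
          have hpm : p.1 ∈ flipped.getD menor [] := by
            rw [hgroup]
            exact List.mem_map_of_mem (List.mem_filter.mpr ⟨hp, by simp [heq]⟩)
          exact PySem.List.key_head_sorted_le _ (fun x => x) hsort p.1 hpm
      have heqpair : (h0, menor) = bb :=
        pvLe_antisymm (hh0min bb hBmem') (hBall' (h0, menor) hh0pair)
      rw [hA, hB, ← heqpair]

-- ===== VERDICT (by name: the statement is the Claim_ definition above) =====
theorem producto_mas_barato_spec : Claim_equal_producto_mas_barato := by
  intro catalogo _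
  unfold Spec_producto_mas_barato
  exact (pv_main catalogo).symm
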